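-- pv_equiv track=rewrite | github.com/jxxglcc/RMCNN | model/RMCNN.py | patch_len
-- ===== SOURCE A (Python) =====
-- def patch_len(n, blocks):
--     list_len=[]
--     base = n//blocks
--     for i in range(blocks):
--         list_len.append(base)
--     for i in range(n - base*blocks):
--         list_len[i] += 1
--
--     if sum(list_len) == n:
--         return list_len
--     else:
--         return ValueError('check your blocks and axis should be split again')
-- ===== SOURCE B (Python) =====
-- def patch_len(n, blocks):
--     # closed form: block i gets ceil((n - i) / blocks) units, i.e. the i-th
--     # per-index difference of the front-loaded even split
--     return [(n - i + blocks - 1) // blocks for i in range(blocks)]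
-- ===== Notes on version B (the rewrite author's own statement) =====
-- stated objective: simpler
-- what changed: Replaces A's fill-then-increment two-loop scheme (and its sum self-check) by a single comprehension computing each block length directly from the closed form (n - i + blocks - 1)//blocks.
-- outside the precondition, e.g. on patch_len(5, 0): A raises ZeroDivisionError, B returns []
import Mathlib
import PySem

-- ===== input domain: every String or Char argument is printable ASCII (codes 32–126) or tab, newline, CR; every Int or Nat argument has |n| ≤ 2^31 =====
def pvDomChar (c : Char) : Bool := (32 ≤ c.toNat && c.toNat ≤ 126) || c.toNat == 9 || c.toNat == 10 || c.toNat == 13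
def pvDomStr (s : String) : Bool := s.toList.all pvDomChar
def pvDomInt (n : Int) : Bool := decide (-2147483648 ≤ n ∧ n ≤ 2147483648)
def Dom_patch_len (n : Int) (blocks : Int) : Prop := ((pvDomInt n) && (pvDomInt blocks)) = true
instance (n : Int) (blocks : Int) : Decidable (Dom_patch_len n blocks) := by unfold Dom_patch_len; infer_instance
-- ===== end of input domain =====

-- B replaces A's fill loop + increment loop + sum self-check by one comprehension computing
-- each block length from a closed per-index formula (simpler decomposition, same O(blocks) cost).

-- ===== PORT A =====
def patch_len (n : Int) (blocks : Int) : List Int :=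
  let base := PySem.Int.floordiv n blocks
  let list_len := (PySem.List.pyRange 0 blocks 1).foldl (fun acc _ => acc ++ [base]) []
  let list_len := (PySem.List.pyRange 0 (n - base * blocks) 1).foldl
      (fun acc i => PySem.List.pySetD acc i (PySem.List.pyGetD acc i 0 + 1)) list_len
  if list_len.sum = n then list_len
  else []  -- Python returns a ValueError OBJECT here (outside Pre_patch_len; not a List Int)

-- ===== PORT B =====
def patch_len_alt (n : Int) (blocks : Int) : List Int :=
  (PySem.List.pyRange 0 blocks 1).map
    (fun i => PySem.Int.floordiv (n - i + blocks - 1) blocks)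

-- ===== PRECONDITION & SPEC =====
-- Pre_ excludes blocks = 0, where A raises ZeroDivisionError, and blocks < 0 with n ≠ 0,
-- where A returns a ValueError OBJECT — not a value of the declared list type.
def Pre_patch_len (n : Int) (blocks : Int) : Prop := 0 < blocks ∨ (blocks < 0 ∧ n = 0)
instance (n : Int) (blocks : Int) : Decidable (Pre_patch_len n blocks) := by
  unfold Pre_patch_len; infer_instance
def pvWitness_patch_len : Int × Int := (7, 3)

def Spec_patch_len (n : Int) (blocks : Int) (out : List Int) : Prop := out = patch_len_alt n blocks
instance (n : Int) (blocks : Int) (out : List Int) : Decidable (Spec_patch_len n blocks out) := by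
  unfold Spec_patch_len; infer_instance

-- ===== CLAIM (what is proved, stated in full; the proofs are below) =====
def Claim_equal_patch_len : Prop := ∀ (n : Int) (blocks : Int), Dom_patch_len n blocks → Pre_patch_len n blocks → Spec_patch_len n blocks (patch_len n blocks)

-- ===== LEMMAS AND PROOFS =====

-- A's fill loop builds a replicate list.
theorem pv_fill_loop (base : Int) (l : List Int) (acc : List Int) :
    l.foldl (fun acc _ => acc ++ [base]) acc = acc ++ List.replicate l.length base := by
  induction l generalizing acc with
  | nil => simp
  | cons x xs ih =>
      rw [List.foldl_cons, ih]
      simp [List.replicate_succ, List.append_assoc]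

-- one step of A's increment loop: reading index j of the split list gives the old value …
theorem pv_get_mid (x y : Int) (j m : Nat) (hm : 0 < m) :
    PySem.List.pyGetD (List.replicate j x ++ List.replicate m y) (j : Int) 0 = y := by
  simp [hm]

-- … and writing x there moves the boundary one step to the right.
theorem pv_set_mid (x y : Int) (j m : Nat) (hm : 0 < m) :
    PySem.List.pySetD (List.replicate j x ++ List.replicate m y) (j : Int) x
      = List.replicate (j + 1) x ++ List.replicate (m - 1) y := by
  simp
  induction j with
  | zero => cases m with | zero => omega | succ m' => simp [List.replicate_succ]
  | succ j' ih => simp [List.replicate_succ] at *; exact ih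

-- A's increment loop, parametrised over its starting point j.
theorem pv_incr_loop (base : Int) (j r b : Nat) (hjr : j ≤ r) (hrb : r ≤ b) :
    (PySem.List.pyRange (j : Int) (r : Int) 1).foldl
        (fun acc i => PySem.List.pySetD acc i (PySem.List.pyGetD acc i 0 + 1))
        (List.replicate j (base + 1) ++ List.replicate (b - j) base)
      = List.replicate r (base + 1) ++ List.replicate (b - r) base := by
  induction hk : r - j generalizing j with
  | zero =>
      have hjr' : j = r := by omega
      subst hjr'
      rw [PySem.List.pyRange_one_eq_nil (le_refl _)]
      rfl
  | succ k ih =>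
      have hlt : j < r := by omega
      rw [PySem.List.pyRange_one_cons (by exact_mod_cast hlt)]
      rw [List.foldl_cons]
      rw [pv_get_mid (base + 1) base j (b - j) (by omega)]
      rw [pv_set_mid (base + 1) base j (b - j) (by omega)]
      have hcast : ((j : Int) + 1) = ((j + 1 : Nat) : Int) := by push_cast; ring
      have hsub : b - j - 1 = b - (j + 1) := by omega
      rw [hcast, hsub]
      exact ih (j + 1) (by omega) (by omega)

-- B's closed form at one index equals base plus one exactly on the first (n mod b) indices.
theorem pv_formula (n b i : Int) (hb : 0 < b) (hi0 : 0 ≤ i) (hib : i < b) :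
    PySem.Int.floordiv (n - i + b - 1) b
      = PySem.Int.floordiv n b + (if i < PySem.Int.mod n b then 1 else 0) := by
  have hid := PySem.Int.floordiv_mul_add_mod n b
  have hr : 0 ≤ PySem.Int.mod n b ∧ PySem.Int.mod n b < b := by
    rw [PySem.Int.mod_eq_emod_of_pos hb]
    exact ⟨Int.emod_nonneg _ (by omega), Int.emod_lt_of_pos _ hb⟩
  set base := PySem.Int.floordiv n b with hbase
  set r := PySem.Int.mod n b with hrdef
  rw [PySem.Int.floordiv_eq_iff_of_pos hb]
  split_ifs with h
  · constructor <;> nlinarith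
  · constructor <;> nlinarith

-- ===== VERDICT (by name: the statement is the Claim_ definition above) =====
theorem patch_len_spec : Claim_equal_patch_len := by
  intro n blocks _ hpre
  unfold Spec_patch_len patch_len patch_len_alt
  rcases hpre with hpos | ⟨hneg, hn0⟩
  · -- 0 < blocks
    have hb0 : blocks ≠ 0 := by omega
    set base := PySem.Int.floordiv n blocks with hbase
    set r := PySem.Int.mod n blocks with hrdef
    have hid : base * blocks + r = n := PySem.Int.floordiv_mul_add_mod n blocks
    have hrb : 0 ≤ r ∧ r < blocks := by
      rw [hrdef, PySem.Int.mod_eq_emod_of_pos hpos]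
      exact ⟨Int.emod_nonneg _ hb0, Int.emod_lt_of_pos _ hpos⟩
    -- first loop
    have h1 : (PySem.List.pyRange 0 blocks 1).foldl (fun acc _ => acc ++ [base]) []
        = List.replicate blocks.toNat base := by
      rw [pv_fill_loop]
      simp [PySem.List.length_pyRange_one]
    -- second loop
    have hne : n - base * blocks = ((r.toNat : Nat) : Int) := by omega
    have hstart : List.replicate blocks.toNat base
        = List.replicate 0 (base + 1) ++ List.replicate (blocks.toNat - 0) base := by simp
    have h2 : (PySem.List.pyRange 0 (n - base * blocks) 1).foldl
          (fun acc i => PySem.List.pySetD acc i (PySem.List.pyGetD acc i 0 + 1))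
          (List.replicate blocks.toNat base)
        = List.replicate r.toNat (base + 1) ++ List.replicate (blocks.toNat - r.toNat) base := by
      rw [hne, hstart]
      have h00 : ((0 : Nat) : Int) = (0 : Int) := by norm_num
      rw [← h00]
      exact pv_incr_loop base 0 r.toNat blocks.toNat (by omega) (by omega)
    simp only [h1, h2]
    -- the sum check succeeds
    have hsum : (List.replicate r.toNat (base + 1)
        ++ List.replicate (blocks.toNat - r.toNat) base).sum = n := by
      have hle : r.toNat ≤ blocks.toNat := by omega
      have hbn : ((blocks.toNat : Nat) : Int) = blocks := by omega
      have hrn : ((r.toNat : Nat) : Int) = r := by omega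
      rw [List.sum_append, List.sum_replicate, List.sum_replicate, nsmul_eq_mul, nsmul_eq_mul]
      push_cast [Nat.cast_sub hle]
      rw [hbn, hrn]
      linear_combination hid
    rw [if_pos hsum]
    -- equality with B's comprehension, element by element
    apply List.ext_getElem
    · simp [PySem.List.length_pyRange_one]
      omega
    · intro k hk1 hk2
      have hkb : k < blocks.toNat := by
        simpa [PySem.List.length_pyRange_one] using hk2
      rw [List.getElem_map, PySem.List.getElem_pyRange_one]
      have hfi : PySem.Int.floordiv (n - (0 + (k : Int)) + blocks - 1) blocks
          = base + (if (k : Int) < r then 1 else 0) := by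
        simpa using pv_formula n blocks (k : Int) hpos (by omega) (by omega)
      rw [hfi]
      by_cases hkr : k < r.toNat
      · rw [List.getElem_append_left (by simpa using hkr)]
        rw [List.getElem_replicate]
        rw [if_pos (by omega)]
      · rw [List.getElem_append_right (by simpa using hkr)]
        rw [List.getElem_replicate]
        rw [if_neg (by omega), add_zero]
  · -- blocks < 0 and n = 0: both sides are []
    subst hn0
    have hfd : PySem.Int.floordiv 0 blocks = 0 := by simp [PySem.Int.floordiv]
    have hnil : PySem.List.pyRange 0 blocks 1 = [] :=
      PySem.List.pyRange_one_eq_nil (by omega)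
    simp [hfd, hnil, PySem.List.pyRange_one_eq_nil]
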